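-- pv_equiv track=rewrite | github.com/SergeiIakukhin/HomeWork | Tasks/Task_8.py | contains_in_list
-- ===== SOURCE A (Python) =====
-- def contains_in_list(small: list[int], big: list[int]) -> bool:
--     if not set(small).issubset(set(big)):
--         return False
--     compared_sequence = []
--     for el in big:
--         if el in small and len(compared_sequence) < len(small):
--             compared_sequence.append(el)
--         elif len(compared_sequence) == len(small):
--             break
--
--     return compared_sequence == small
-- ===== SOURCE B (Python) =====
-- def contains_in_list(small: list[int], big: list[int]) -> bool:
--     members = set(small)
--     it = iter(big)
--     for s in small:
--         for x in it:
--             if x in members: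
--                 if x != s:
--                     return False
--                 break
--         else:
--             return False
--     return True
-- ===== Notes on version B (the rewrite author's own statement) =====
-- stated objective: alternative
-- what changed: Inverts the traversal: the outer loop iterates over small, and for each target element it consumes a shared iterator of big until the next member of set(small), failing on mismatch or exhaustion (for/else) - instead of A's single pass over big that collects a compared_sequence behind an issubset guard and compares the whole list at the end.
import Mathlib
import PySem

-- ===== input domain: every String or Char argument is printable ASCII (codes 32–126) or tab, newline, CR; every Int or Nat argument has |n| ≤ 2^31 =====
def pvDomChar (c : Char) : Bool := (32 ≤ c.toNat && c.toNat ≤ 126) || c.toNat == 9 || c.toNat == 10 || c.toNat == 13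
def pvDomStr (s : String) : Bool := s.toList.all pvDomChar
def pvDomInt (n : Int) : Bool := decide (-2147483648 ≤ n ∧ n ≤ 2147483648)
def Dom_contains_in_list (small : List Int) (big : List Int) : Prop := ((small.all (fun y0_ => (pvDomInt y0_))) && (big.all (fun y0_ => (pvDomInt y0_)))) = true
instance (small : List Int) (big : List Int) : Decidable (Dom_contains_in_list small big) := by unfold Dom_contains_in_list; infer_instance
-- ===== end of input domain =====

-- B inverts the traversal (outer loop over small, consuming an iterator of big to find each next member, for/else) instead of A's collect-then-compare pass over big; objective: alternative.

-- ===== PORT A =====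
-- the for-loop of A, with its append / break behaviour
def aLoop (small : List Int) (acc : List Int) : List Int → List Int
  | [] => acc
  | el :: rest =>
    if small.contains el && decide (acc.length < small.length) then
      aLoop small (acc ++ [el]) rest
    else if acc.length == small.length then acc
    else aLoop small acc rest

def contains_in_list (small : List Int) (big : List Int) : Bool :=
  if !(PySem.Set.issubset (PySem.Set.ofList small) (PySem.Set.ofList big)) then false
  else aLoop small [] big == small

-- ===== PORT B =====
-- B's inner 'for x in it: … break / else' : advance the iterator to the next member of the set;
-- returns that element and the remaining iterator, or none if the iterator is exhausted
def bNext (members : PySem.Set Int) : List Int → Option (Int × List Int)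
  | [] => none
  | x :: rest => if PySem.Set.contains members x then some (x, rest) else bNext members rest

-- B's outer 'for s in small' over the shared iterator
def bGo (members : PySem.Set Int) : List Int → List Int → Bool
  | [], _ => true
  | s :: srest, it =>
    match bNext members it with
    | none => false                      -- for/else: iterator exhausted
    | some (x, rest) => if x != s then false else bGo members srest rest

def contains_in_list_alt (small : List Int) (big : List Int) : Bool :=
  bGo (PySem.Set.ofList small) small big

-- ===== PRECONDITION & SPEC =====
def Spec_contains_in_list (small : List Int) (big : List Int) (out : Bool) : Prop := out = contains_in_list_alt small big
instance (small : List Int) (big : List Int) (out : Bool) : Decidable (Spec_contains_in_list small big out) := by unfold Spec_contains_in_list; infer_instance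

-- ===== CLAIM (what is proved, stated in full; the proofs are below) =====
def Claim_equal_contains_in_list : Prop := ∀ (small : List Int) (big : List Int), Dom_contains_in_list small big → Spec_contains_in_list small big (contains_in_list small big)

-- ===== LEMMAS AND PROOFS =====

-- characterisation of A's loop: append the first (len small - len acc) small-members of big
theorem aLoop_char (small : List Int) (big : List Int) (acc : List Int)
    (h : acc.length ≤ small.length) :
    aLoop small acc big
      = acc ++ (big.filter (fun el => small.contains el)).take (small.length - acc.length) := by
  induction big generalizing acc with
  | nil => simp [aLoop]
  | cons el rest ih =>
    simp only [aLoop, List.filter_cons]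
    by_cases hm : small.contains el
    · by_cases hl : acc.length < small.length
      · simp only [hm, hl, decide_true, Bool.and_self, if_true]
        rw [ih _ (by simpa using hl)]
        have : small.length - acc.length = (small.length - (acc ++ [el]).length) + 1 := by
          simp; omega
        simp [this, List.take_succ_cons]
      · have he : acc.length = small.length := by omega
        simp [hm, hl, he]
    · by_cases hl : acc.length = small.length
      · simp [hm, hl]
      · simp only [hm, Bool.false_and, if_false, hl, decide_false, beq_iff_eq, if_neg hl]
        rw [ih _ h]
        simp [hm]

-- bNext and filter: bNext finds exactly the head of the filtered iterator
theorem bNext_char (m : PySem.Set Int) (b : List Int) :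
    (bNext m b = none ∧ b.filter (fun el => PySem.Set.contains m el) = []) ∨
    (∃ x rest, bNext m b = some (x, rest) ∧
      b.filter (fun el => PySem.Set.contains m el)
        = x :: rest.filter (fun el => PySem.Set.contains m el)) := by
  induction b with
  | nil => left; exact ⟨rfl, rfl⟩
  | cons x rest ih =>
    cases hm : PySem.Set.contains m x with
    | true =>
      right
      refine ⟨x, rest, ?_, ?_⟩
      · simp only [bNext, hm, if_true]
      · simp only [List.filter_cons, hm, if_true]
    | false =>
      have h1 : bNext m (x :: rest) = bNext m rest := by
        simp only [bNext, hm, Bool.false_eq_true, if_false]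
      have h2 : List.filter (fun el => PySem.Set.contains m el) (x :: rest)
          = List.filter (fun el => PySem.Set.contains m el) rest := by
        simp only [List.filter_cons, hm, Bool.false_eq_true, if_false]
      rw [h1, h2]
      exact ih

-- characterisation of B's loops via take/filter
theorem bGo_char (m : PySem.Set Int) (s b : List Int) :
    bGo m s b = ((b.filter (fun el => PySem.Set.contains m el)).take s.length == s) := by
  induction s generalizing b with
  | nil => simp [bGo]
  | cons s0 srest ih =>
    rcases bNext_char m b with ⟨hn, hf⟩ | ⟨x, rest, hn, hf⟩
    · have hb : bGo m (s0 :: srest) b = false := by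
        simp only [bGo, hn]
      rw [hb, hf]
      simp
    · have hb : bGo m (s0 :: srest) b
          = if x != s0 then false else bGo m srest rest := by
        simp only [bGo, hn]
      rw [hb, hf, List.length_cons, List.take_succ_cons]
      by_cases hv : x = s0
      · have h1 : (x != s0) = false := by simp [hv]
        rw [h1, if_neg (by simp), ih rest, hv]
        simp
      · have h1 : (x != s0) = true := bne_iff_ne.mpr hv
        have hne : (x == s0) = false := by rw [beq_eq_false_iff_ne]; exact hv
        rw [h1, if_pos rfl, List.cons_beq_cons, hne]
        simp

-- the two membership predicates agree, so the filtered lists agree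
theorem filter_members (small b : List Int) :
    b.filter (fun el => PySem.Set.contains (PySem.Set.ofList small) el)
      = b.filter (fun el => small.contains el) := by
  apply List.filter_congr
  intro x _
  simp only [PySem.Set.contains, List.contains_eq_mem, decide_eq_true_eq, PySem.Set.mem_ofList]

-- if the first (len small) small-members of big equal small, every element of small is in big
theorem subset_of_take_eq (small big : List Int)
    (h : (big.filter (fun el => small.contains el)).take small.length = small) :
    ∀ x ∈ small, x ∈ big := by
  intro x hx
  have : x ∈ (big.filter (fun el => small.contains el)).take small.length := by
    rw [h]; exact hx
  have := List.mem_of_mem_take this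
  exact List.mem_of_mem_filter this

-- ===== VERDICT (by name: the statement is the Claim_ definition above) =====
theorem contains_in_list_spec : Claim_equal_contains_in_list := by
  intro small big _
  unfold Spec_contains_in_list contains_in_list contains_in_list_alt
  rw [bGo_char, filter_members]
  have hA := aLoop_char small big [] (Nat.zero_le _)
  simp only [List.nil_append, Nat.sub_zero] at hA
  by_cases hsub : PySem.Set.issubset (PySem.Set.ofList small) (PySem.Set.ofList big) = true
  · simp [hsub, hA]
  · simp only [hsub, Bool.not_false, Bool.false_eq_true, if_true]
    by_cases heq : (big.filter (fun el => small.contains el)).take small.length = small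
    · exfalso
      apply hsub
      rw [PySem.Set.issubset_iff]
      intro x hx
      rw [PySem.Set.mem_ofList] at hx ⊢
      exact subset_of_take_eq small big heq x hx
    · simp only [List.contains_eq_mem] at heq
      simp [heq]
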